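-- pv_equiv track=rewrite | github.com/Euclidophren/Algorithms_and_Data_Structures | sortings/smooth_sort/smooth_sort.py | heap_division
-- ===== SOURCE A (Python) =====
-- def count_indices(i, indices):
--     indices.append(2 * indices[i] + 1)
--     indices.append(2 * indices[i] + 2)
--     return indices
--
-- def get_list(index_part, heap):
--     heap_part = []
--     for i in index_part:
--         if i < len(heap):
--             heap_part.append(heap[i])
--     return heap_part
--
-- def heap_division(heap):
--     index = 0
--     indices_left, indices_right = [1], [2]
--     while indices_left[-1] < len(heap):
--         indices_left = count_indices(index, indices_left)
--         indices_right = count_indices(index, indices_right)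
--         index += 1
--     heap_left = get_list(indices_left, heap)
--     heap_right = get_list(indices_right, heap)
--     return heap_left, heap_right
-- ===== SOURCE B (Python) =====
-- def heap_division(heap):
--     n = len(heap)
--
--     def subtree(root):
--         out = []
--         queue = [root]
--         head = 0
--         while head < len(queue):
--             i = queue[head]
--             head += 1
--             if 0 <= i < n:
--                 out.append(heap[i])
--                 queue.append(2 * i + 1)
--                 queue.append(2 * i + 2)
--         return out
--
--     return subtree(1), subtree(2)
-- ===== Notes on version B (the rewrite author's own statement) =====
-- stated objective: alternative
-- what changed: Replaces A's generate-all-indices loop (driven by the left list's last element) plus two filter passes with a single bounds-checked BFS queue traversal per subtree that never expands out-of-range nodes.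
import Mathlib
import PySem

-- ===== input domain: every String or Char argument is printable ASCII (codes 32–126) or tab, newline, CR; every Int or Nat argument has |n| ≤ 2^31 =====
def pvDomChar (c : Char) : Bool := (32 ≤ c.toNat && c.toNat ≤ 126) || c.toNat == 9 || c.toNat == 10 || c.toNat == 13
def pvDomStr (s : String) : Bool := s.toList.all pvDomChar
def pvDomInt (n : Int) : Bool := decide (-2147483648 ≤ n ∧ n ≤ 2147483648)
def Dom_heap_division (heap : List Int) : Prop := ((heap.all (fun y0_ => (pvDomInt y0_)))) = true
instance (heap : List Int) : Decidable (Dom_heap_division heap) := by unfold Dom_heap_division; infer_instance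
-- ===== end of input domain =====

-- B replaces A's generate-then-filter index passes by one pruning BFS per subtree; equal output on all inputs (alternative decomposition, no speed claim).

-- ===== PORT A =====
-- count_indices: appends 2*indices[i]+1 then 2*indices[i]+2 (the second read happens after the first append, as in Python)
def pvCountIndices (i : Int) (indices : List Int) : List Int :=
  let indices1 := indices ++ [2 * PySem.List.pyGetD indices i 0 + 1]
  indices1 ++ [2 * PySem.List.pyGetD indices1 i 0 + 2]

-- get_list: for i in index_part: if i < len(heap): heap_part.append(heap[i])
def pvGetList (indexPart heap : List Int) : List Int :=
  indexPart.foldl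
    (fun acc i => if i < (heap.length : Int) then acc ++ [PySem.List.pyGetD heap i 0] else acc) []

-- the while loop; fuel heap.length+1 provably suffices (pvK_le_len / pvALoop_eq below), so the
-- port returns exactly what the Python loop returns on every input
def pvALoop (heap : List Int) : Nat → Int → List Int → List Int → List Int × List Int
  | 0, _, L, R => (L, R)
  | fuel+1, index, L, R =>
    if PySem.List.pyGetD L (-1) 0 < (heap.length : Int) then
      pvALoop heap fuel (index + 1) (pvCountIndices index L) (pvCountIndices index R)
    else (L, R)

def heap_division (heap : List Int) : List Int × List Int :=
  let p := pvALoop heap (heap.length + 1) 0 [1] [2]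
  (pvGetList p.1 heap, pvGetList p.2 heap)

-- ===== PORT B =====
-- termination measure for the BFS queue: number of in-range nodes in the subtree rooted at i
def pvInCnt (n i : Int) : Nat :=
  if 0 ≤ i ∧ i < n then 1 + pvInCnt n (2 * i + 1) + pvInCnt n (2 * i + 2) else 0
termination_by (n - i).toNat
decreasing_by · omega
              · omega

-- BFS over one subtree: pop i; if 0 <= i < n emit heap[i] and enqueue its children
def pvSubtree (heap : List Int) : List Int → List Int → List Int
  | [], out => out
  | i :: qs, out =>
    if 0 ≤ i ∧ i < (heap.length : Int) then
      pvSubtree heap (qs ++ [2 * i + 1, 2 * i + 2]) (out ++ [PySem.List.pyGetD heap i 0])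
    else
      pvSubtree heap qs out
termination_by q _ => (q.map (fun j => 2 * pvInCnt (heap.length : Int) j + 1)).sum
decreasing_by
  · rename_i h
    have hc : pvInCnt (heap.length : Int) i
        = 1 + pvInCnt (heap.length : Int) (2 * i + 1) + pvInCnt (heap.length : Int) (2 * i + 2) := by
      rw [pvInCnt, if_pos h]
    simp only [List.map_append, List.map_cons, List.map_nil, List.sum_append, List.sum_cons,
      List.sum_nil]
    omega
  · simp only [List.map_cons, List.sum_cons]
    omega

def heap_division_alt (heap : List Int) : List Int × List Int :=
  (pvSubtree heap [1] [], pvSubtree heap [2] [])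

-- ===== PRECONDITION & SPEC =====
def Spec_heap_division (heap : List Int) (out : List Int × List Int) : Prop := out = heap_division_alt heap
instance (heap : List Int) (out : List Int × List Int) : Decidable (Spec_heap_division heap out) := by unfold Spec_heap_division; infer_instance

-- ===== CLAIM (what is proved, stated in full; the proofs are below) =====
def Claim_equal_heap_division : Prop := ∀ (heap : List Int), Dom_heap_division heap → Spec_heap_division heap (heap_division heap)

-- ===== LEMMAS AND PROOFS =====

-- value of the j-th node (BFS order) of the subtree rooted at heap index r
def pvVal (r : Int) (j : Nat) : Int :=
  if j = 0 then r else 2 * pvVal r ((j - 1) / 2) + (if j % 2 = 1 then 1 else 2)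
termination_by j
decreasing_by omega

theorem pvVal_zero (r : Int) : pvVal r 0 = r := by rw [pvVal]; simp

theorem pvVal_odd (r : Int) (m : Nat) : pvVal r (2 * m + 1) = 2 * pvVal r m + 1 := by
  rw [pvVal]
  have h2 : (2 * m + 1) % 2 = 1 := by omega
  simp [h2]

theorem pvVal_even (r : Int) (m : Nat) : pvVal r (2 * m + 2) = 2 * pvVal r m + 2 := by
  rw [pvVal]
  have h1 : (2 * m + 1) / 2 = m := by omega
  simp [h1]

theorem pvVal_lt_succ (r : Int) (hr : 0 ≤ r) : ∀ j, pvVal r j < pvVal r (j + 1) := by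
  intro j
  induction j using Nat.strong_induction_on with
  | _ j ih =>
    match j, ih with
    | 0, _ =>
      have h := pvVal_odd r 0
      rw [pvVal_zero] at h
      show pvVal r 0 < pvVal r 1
      rw [pvVal_zero, h]; omega
    | (m+1), ih =>
      obtain ⟨t, rfl | rfl⟩ := Nat.even_or_odd' m
      · show pvVal r (2*t+1) < pvVal r (2*t+1+1)
        rw [show 2*t+1+1 = 2*t+2 by ring, pvVal_odd, pvVal_even]; omega
      · show pvVal r (2*t+1+1) < pvVal r (2*t+1+1+1)
        rw [show 2*t+1+1 = 2*t+2 by ring, show 2*t+2+1 = 2*(t+1)+1 by ring, pvVal_even, pvVal_odd]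
        have := ih t (by omega)
        omega

theorem pvVal_mono (r : Int) (hr : 0 ≤ r) : StrictMono (pvVal r) :=
  strictMono_nat_of_lt_succ (pvVal_lt_succ r hr)

theorem pvVal_ge (r : Int) (hr : 0 ≤ r) : ∀ j, r + j ≤ pvVal r j := by
  intro j
  induction j with
  | zero => rw [pvVal_zero]; omega
  | succ m ih => have := pvVal_lt_succ r hr m; omega

theorem pvVal_root_le (r r' : Int) (h : r ≤ r') : ∀ j, pvVal r j ≤ pvVal r' j := by
  intro j
  induction j using Nat.strong_induction_on with
  | _ j ih =>
    match j, ih with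
    | 0, _ => rw [pvVal_zero, pvVal_zero]; exact h
    | (m+1), ih =>
      obtain ⟨t, rfl | rfl⟩ := Nat.even_or_odd' m
      · show pvVal r (2*t+1) ≤ pvVal r' (2*t+1)
        rw [pvVal_odd, pvVal_odd]
        have := ih t (by omega); omega
      · show pvVal r (2*t+1+1) ≤ pvVal r' (2*t+1+1)
        rw [show 2*t+1+1 = 2*t+2 by ring, pvVal_even, pvVal_even]
        have := ih t (by omega); omega

-- the generated index list after k loop iterations
def pvG (r : Int) (k : Nat) : List Int := (List.range (2 * k + 1)).map (pvVal r)

theorem pvG_zero (r : Int) : pvG r 0 = [r] := by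
  simp [pvG, List.range_succ, pvVal_zero]

theorem pvG_last (r : Int) (k : Nat) : PySem.List.pyGetD (pvG r k) (-1) 0 = pvVal r (2 * k) := by
  rw [pvG, show 2*k+1 = (2*k)+1 by rfl, List.range_succ, List.map_append]
  exact PySem.List.pyGetD_neg_one_append_singleton _ _ _

theorem pvG_getD (r : Int) (k j : Nat) (h : j < 2 * k + 1) :
    PySem.List.pyGetD (pvG r k) (j : Int) 0 = pvVal r j := by
  rw [PySem.List.pyGetD_natCast, pvG]
  rw [List.getD_eq_getElem?_getD]
  simp [List.getElem?_map, List.getElem?_range h]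

theorem pvG_step (r : Int) (k : Nat) :
    pvG r (k + 1) = pvG r k ++ [2 * pvVal r k + 1, 2 * pvVal r k + 2] := by
  rw [pvG, pvG, show 2*(k+1)+1 = ((2*k+1)+1)+1 by ring,
      List.range_succ (n := (2*k+1)+1), List.range_succ (n := 2*k+1)]
  simp only [List.map_append, List.map_cons, List.map_nil]
  rw [pvVal_odd, show (2*k+1)+1 = 2*k+2 by ring, pvVal_even]
  simp

theorem pvCountIndices_G (r : Int) (k : Nat) :
    pvCountIndices (k : Int) (pvG r k) = pvG r (k + 1) := by
  rw [pvCountIndices]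
  have h1 : PySem.List.pyGetD (pvG r k) (k : Int) 0 = pvVal r k := pvG_getD r k k (by omega)
  have h2 : PySem.List.pyGetD (pvG r k ++ [2 * pvVal r k + 1]) (k : Int) 0 = pvVal r k := by
    rw [PySem.List.pyGetD_natCast, List.getD_eq_getElem?_getD,
        List.getElem?_append_left (by simp [pvG]; omega)]
    have := pvG_getD r k k (by omega)
    rw [PySem.List.pyGetD_natCast, List.getD_eq_getElem?_getD] at this
    exact this
  rw [h1, h2, List.append_assoc, List.singleton_append, pvG_step]

-- existence of a stopping point
theorem pvStop_ex (heap : List Int) (r : Int) (hr : 1 ≤ r) :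
    ∃ j, (heap.length : Int) ≤ pvVal r j := by
  refine ⟨heap.length, ?_⟩
  have := pvVal_ge r (by omega) heap.length
  omega

theorem pvStopK_ex (heap : List Int) : ∃ k, (heap.length : Int) ≤ pvVal 1 (2 * k) := by
  refine ⟨heap.length, ?_⟩
  have := pvVal_ge 1 (by omega) (2 * heap.length)
  omega

-- number of iterations of A's while loop
def pvK (heap : List Int) : Nat := Nat.find (pvStopK_ex heap)

theorem pvK_spec (heap : List Int) : (heap.length : Int) ≤ pvVal 1 (2 * pvK heap) := by
  rw [pvK]; exact Nat.find_spec (pvStopK_ex heap)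

-- first out-of-range BFS position of the subtree rooted at r
def pvP (heap : List Int) (r : Int) : Nat :=
  if hr : 1 ≤ r then Nat.find (pvStop_ex heap r hr) else 0

theorem pvP_spec (heap : List Int) (r : Int) (hr : 1 ≤ r) :
    (heap.length : Int) ≤ pvVal r (pvP heap r) ∧
      ∀ j < pvP heap r, pvVal r j < (heap.length : Int) := by
  rw [pvP, dif_pos hr]
  exact ⟨Nat.find_spec (pvStop_ex heap r hr), fun j hj => by
    have := Nat.find_min (pvStop_ex heap r hr) hj; omega⟩

theorem pvK_le_len (heap : List Int) : pvK heap ≤ heap.length := by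
  apply Nat.find_le
  have := pvVal_ge 1 (by omega) (2 * heap.length)
  omega

theorem pvK_lt (heap : List Int) (k : Nat) (h : k < pvK heap) :
    pvVal 1 (2 * k) < (heap.length : Int) := by
  rw [pvK] at h
  have := Nat.find_min (pvStopK_ex heap) h; omega

theorem pvALoop_eq (heap : List Int) :
    ∀ fuel k, k ≤ pvK heap → pvK heap ≤ k + fuel →
      pvALoop heap fuel (k : Int) (pvG 1 k) (pvG 2 k) = (pvG 1 (pvK heap), pvG 2 (pvK heap)) := by
  intro fuel
  induction fuel with
  | zero =>
    intro k h1 h2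
    have : k = pvK heap := by omega
    subst this
    rfl
  | succ fuel ih =>
    intro k h1 h2
    rw [pvALoop]
    rcases Nat.lt_or_ge k (pvK heap) with hlt | hge
    · rw [if_pos (by rw [pvG_last]; exact pvK_lt heap k hlt)]
      rw [pvCountIndices_G, pvCountIndices_G, show ((k : Int) + 1) = ((k+1 : Nat) : Int) by push_cast; ring]
      exact ih (k + 1) (by omega) (by omega)
    · have : k = pvK heap := by omega
      subst this
      rw [if_neg (by rw [pvG_last]; have := pvK_spec heap; omega)]

theorem pvGetList_eq (heap : List Int) : ∀ (l acc : List Int),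
    l.foldl (fun acc i => if i < (heap.length : Int) then acc ++ [PySem.List.pyGetD heap i 0] else acc) acc
      = acc ++ (l.filter (fun i => decide (i < (heap.length : Int)))).map
          (fun i => PySem.List.pyGetD heap i 0) := by
  intro l
  induction l with
  | nil => simp
  | cons i l ih =>
    intro acc
    by_cases h : i < (heap.length : Int) <;> simp [List.foldl_cons, h, ih]

theorem pvRange_filter_lt : ∀ m P : Nat, P ≤ m →
    (List.range m).filter (fun j => decide (j < P)) = List.range P := by
  intro m
  induction m with
  | zero => intro P h; interval_cases P; rfl
  | succ m ih =>
    intro P h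
    rcases Nat.lt_or_ge P (m + 1) with h1 | h1
    · rw [List.range_succ, List.filter_append, ih P (by omega)]
      simp; omega
    · have : P = m + 1 := by omega
      subst this
      rw [List.filter_eq_self.2]
      intro a ha
      simp at ha ⊢
      omega

-- A's filtered output for one subtree, in closed form
theorem pvA_component (heap : List Int) (r : Int) (hr : 1 ≤ r) (hP : pvP heap r ≤ 2 * pvK heap + 1) :
    pvGetList (pvG r (pvK heap)) heap
      = (List.range (pvP heap r)).map (fun j => PySem.List.pyGetD heap (pvVal r j) 0) := by
  rw [pvGetList, pvGetList_eq, List.nil_append, pvG, List.filter_map]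
  have hcong : ∀ j ∈ List.range (2 * pvK heap + 1),
      ((fun i => decide (i < (heap.length : Int))) ∘ pvVal r) j = decide (j < pvP heap r) := by
    intro j _
    simp only [Function.comp_apply]
    rcases Nat.lt_or_ge j (pvP heap r) with h | h
    · simp [(pvP_spec heap r hr).2 j h, h]
    · have h2 : ¬ pvVal r j < (heap.length : Int) := by
        have := (pvP_spec heap r hr).1
        have := pvVal_mono r (by omega) |>.monotone h
        omega
      simp [h2]; omega
  rw [List.filter_congr hcong, pvRange_filter_lt _ _ hP, List.map_map]
  rfl

theorem pvP_le (heap : List Int) (r : Int) (hr : 1 ≤ r) (_hr2 : r ≤ 2) :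
    pvP heap r ≤ 2 * pvK heap + 1 := by
  rw [pvP, dif_pos hr]
  have h1 : (heap.length : Int) ≤ pvVal r (2 * pvK heap) := by
    have := pvK_spec heap
    have := pvVal_root_le 1 r hr (2 * pvK heap)
    omega
  have h2 : Nat.find (pvStop_ex heap r hr) ≤ 2 * pvK heap := Nat.find_le h1
  omega

-- B side: once past the first out-of-range position, nothing more is emitted
theorem pvSubtree_ge (heap : List Int) : ∀ q out, (∀ i ∈ q, (heap.length : Int) ≤ i) →
    pvSubtree heap q out = out := by
  intro q
  induction q with
  | nil => intro out _; rw [pvSubtree]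
  | cons i qs ih =>
    intro out h
    rw [pvSubtree, if_neg (by have := h i (by simp); omega)]
    exact ih out (fun j hj => h j (by simp [hj]))

theorem pvSubtree_at_stop (heap : List Int) (r : Int) (hr : 1 ≤ r) : ∀ out,
    pvSubtree heap ((List.range' (pvP heap r) (pvP heap r + 1)).map (pvVal r)) out = out := by
  intro out
  rw [List.range'_succ, List.map_cons, pvSubtree,
      if_neg (by have := (pvP_spec heap r hr).1; omega)]
  apply pvSubtree_ge
  intro i hi
  simp only [List.mem_map] at hi
  obtain ⟨j, hj, rfl⟩ := hi
  rw [List.mem_range'] at hj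
  have hm : pvP heap r ≤ j := by omega
  have h2 := (pvVal_mono r (by omega)).monotone hm
  have h3 := (pvP_spec heap r hr).1
  omega

theorem pvSubtree_seg (heap : List Int) (r : Int) (hr : 1 ≤ r) :
    ∀ fuel p out, p ≤ pvP heap r → pvP heap r ≤ p + fuel →
      pvSubtree heap ((List.range' p (p + 1)).map (pvVal r)) out
        = out ++ (List.range' p (pvP heap r - p)).map
            (fun j => PySem.List.pyGetD heap (pvVal r j) 0) := by
  intro fuel
  induction fuel with
  | zero =>
    intro p out h1 h2
    have hp : p = pvP heap r := by omega
    subst hp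
    rw [pvSubtree_at_stop heap r hr]
    simp
  | succ fuel ih =>
    intro p out h1 h2
    rcases Nat.eq_or_lt_of_le h1 with heq | hlt
    · subst heq
      rw [pvSubtree_at_stop heap r hr]
      simp
    · rw [List.range'_succ, List.map_cons, pvSubtree,
        if_pos ⟨by have := pvVal_ge r (by omega) p; omega, (pvP_spec heap r hr).2 p hlt⟩]
      have hq : (List.range' (p + 1) p).map (pvVal r) ++ [2 * pvVal r p + 1, 2 * pvVal r p + 2]
          = (List.range' (p + 1) (p + 2)).map (pvVal r) := by
        rw [show p + 2 = (p + 1) + 1 by rfl, List.range'_concat, List.range'_concat,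
            List.map_append, List.map_append]
        simp only [List.map_cons, List.map_nil]
        rw [show p + 1 + 1 * p = 2 * p + 1 by ring, show p + 1 + 1 * (p + 1) = 2 * p + 2 by ring,
            pvVal_odd, pvVal_even]
        simp
      rw [hq, ih (p + 1) _ (by omega) (by omega)]
      rw [show pvP heap r - p = (pvP heap r - (p + 1)) + 1 by omega, List.range'_succ,
          List.map_cons]
      simp

theorem pvB_component (heap : List Int) (r : Int) (hr : 1 ≤ r) :
    pvSubtree heap [r] []
      = (List.range (pvP heap r)).map (fun j => PySem.List.pyGetD heap (pvVal r j) 0) := by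
  have h0 : ([r] : List Int) = (List.range' 0 (0 + 1)).map (pvVal r) := by
    simp [List.range'_succ, pvVal_zero]
  rw [h0, pvSubtree_seg heap r hr (pvP heap r) 0 [] (by omega) (by omega)]
  simp [List.range_eq_range']

-- ===== VERDICT (by name: the statement is the Claim_ definition above) =====
theorem heap_division_spec : Claim_equal_heap_division := by
  intro heap _
  unfold Spec_heap_division heap_division heap_division_alt
  rw [pvB_component heap 1 (by omega), pvB_component heap 2 (by omega)]
  have h1 : ([1] : List Int) = pvG 1 0 := by rw [pvG_zero]
  have h2 : ([2] : List Int) = pvG 2 0 := by rw [pvG_zero]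
  have h0 : (0 : Int) = ((0 : Nat) : Int) := by norm_num
  rw [h1, h2, h0, pvALoop_eq heap (heap.length + 1) 0 (by omega) (by have := pvK_le_len heap; omega)]
  simp only
  rw [pvA_component heap 1 (by omega) (pvP_le heap 1 (by omega) (by omega)),
      pvA_component heap 2 (by omega) (pvP_le heap 2 (by omega) (by omega))]
  norm_num
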